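-- pv_equiv track=rewrite | github.com/brubsby/oeis_py | sequences/A291633.py | can_mid
-- ===== SOURCE A (Python) =====
-- def can_mid(midlen, midstr, midpos):
--     if midpos % 2 == 0:  # even
--         normal_index = midpos // 2
--         i = 0
--         while i < midlen - normal_index and i < normal_index:
--             if midstr[i + normal_index] != midstr[normal_index - i - 1]:
--                 return False
--             i += 1
--         return True
--     else:  # odd
--         normal_index = (midpos - 1) // 2
--         i = 0
--         while i < midlen - normal_index - 1 and i < normal_index:
--             if midstr[i + normal_index + 1] != midstr[normal_index - i - 1]:
--                 return False
--             i += 1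
--         return True
-- ===== SOURCE B (Python) =====
-- def can_mid(midlen, midstr, midpos):
--     if midpos % 2 == 0:
--         ni = midpos // 2
--         count = min(ni, midlen - ni)
--         if count <= 0:
--             return True
--         return midstr[ni - count:ni][::-1] == midstr[ni:ni + count]
--     else:
--         ni = (midpos - 1) // 2
--         count = min(ni, midlen - ni - 1)
--         if count <= 0:
--             return True
--         return midstr[ni - count:ni][::-1] == midstr[ni + 1:ni + 1 + count]
-- ===== Notes on version B (the rewrite author's own statement) =====
-- stated objective: idiomatic
-- what changed: Replaces A's two index-by-index outward-comparison while-loops with computing a clamped pair count and comparing the reversed left substring slice against the right substring slice in one bulk comparison.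
-- outside the precondition, e.g. on can_mid(5, 'aba', 4): A returns False, B returns False
import Mathlib
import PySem

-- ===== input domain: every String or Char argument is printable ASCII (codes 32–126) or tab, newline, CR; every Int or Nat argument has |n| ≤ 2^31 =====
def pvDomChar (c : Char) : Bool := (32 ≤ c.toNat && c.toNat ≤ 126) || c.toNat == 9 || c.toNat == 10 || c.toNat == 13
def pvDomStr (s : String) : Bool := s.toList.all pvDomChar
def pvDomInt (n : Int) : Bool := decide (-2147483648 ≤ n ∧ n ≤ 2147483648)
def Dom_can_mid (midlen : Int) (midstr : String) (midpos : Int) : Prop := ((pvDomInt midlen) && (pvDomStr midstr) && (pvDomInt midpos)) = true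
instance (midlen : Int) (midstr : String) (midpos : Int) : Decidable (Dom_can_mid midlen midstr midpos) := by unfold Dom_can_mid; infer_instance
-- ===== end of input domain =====

-- B replaces A's two character-by-character outward-comparison loops by a clamped-count
-- reversed-slice comparison (idiomatic, same cost); equivalence proved on Pre_ (no IndexError).


-- ===== PORT A =====
-- A's even-branch while loop; the `none` case is Python's IndexError (excluded by Pre_).
def canMidEvenLoop (midlen : Int) (s : List Char) (ni i : Int) : Bool :=
  if h : i < midlen - ni ∧ i < ni then
    match PySem.List.pyGet? s (i + ni), PySem.List.pyGet? s (ni - i - 1) with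
    | some a, some b => if a ≠ b then false else canMidEvenLoop midlen s ni (i + 1)
    | _, _ => false
  else true
termination_by (ni - i).toNat
decreasing_by omega

-- A's odd-branch while loop; the `none` case is Python's IndexError (excluded by Pre_).
def canMidOddLoop (midlen : Int) (s : List Char) (ni i : Int) : Bool :=
  if h : i < midlen - ni - 1 ∧ i < ni then
    match PySem.List.pyGet? s (i + ni + 1), PySem.List.pyGet? s (ni - i - 1) with
    | some a, some b => if a ≠ b then false else canMidOddLoop midlen s ni (i + 1)
    | _, _ => false
  else true
termination_by (ni - i).toNat
decreasing_by omega

def can_mid (midlen : Int) (midstr : String) (midpos : Int) : Bool :=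
  if PySem.Int.mod midpos 2 == 0 then
    canMidEvenLoop midlen midstr.toList (PySem.Int.floordiv midpos 2) 0
  else
    canMidOddLoop midlen midstr.toList (PySem.Int.floordiv (midpos - 1) 2) 0

-- ===== PORT B =====
-- left[::-1] is List.reverse (PySem.List.slice?_none_none_neg_one); slices exact via PySem.List.slice.
def can_mid_alt (midlen : Int) (midstr : String) (midpos : Int) : Bool :=
  let s := midstr.toList
  if PySem.Int.mod midpos 2 == 0 then
    let ni := PySem.Int.floordiv midpos 2
    let count := min ni (midlen - ni)
    if count ≤ 0 then true
    else
      (PySem.List.slice s (some (ni - count)) (some ni)).reverse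
        == PySem.List.slice s (some ni) (some (ni + count))
  else
    let ni := PySem.Int.floordiv (midpos - 1) 2
    let count := min ni (midlen - ni - 1)
    if count ≤ 0 then true
    else
      (PySem.List.slice s (some (ni - count)) (some ni)).reverse
        == PySem.List.slice s (some (ni + 1)) (some (ni + 1 + count))

-- ===== PRECONDITION & SPEC =====
-- Pre_ excludes the inputs whose comparison window overruns the string (midlen larger than the
-- actual length with the window reaching past the end): there A raises IndexError unless an
-- earlier character mismatch already returned False.
def Pre_can_mid (midlen : Int) (midstr : String) (midpos : Int) : Prop :=
  let L : Int := (midstr.toList.length : Int)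
  if midpos % 2 = 0 then
    let ni := PySem.Int.floordiv midpos 2
    midlen ≤ L ∨ ni ≤ 0 ∨ midlen ≤ ni ∨ 2 * ni ≤ L
  else
    let ni := PySem.Int.floordiv (midpos - 1) 2
    midlen ≤ L ∨ ni ≤ 0 ∨ midlen ≤ ni + 1 ∨ 2 * ni < L

instance (midlen : Int) (midstr : String) (midpos : Int) : Decidable (Pre_can_mid midlen midstr midpos) := by
  unfold Pre_can_mid; infer_instance

def pvWitness_can_mid : Int × String × Int := (4, "abba", 4)

def Spec_can_mid (midlen : Int) (midstr : String) (midpos : Int) (out : Bool) : Prop := out = can_mid_alt midlen midstr midpos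
instance (midlen : Int) (midstr : String) (midpos : Int) (out : Bool) : Decidable (Spec_can_mid midlen midstr midpos out) := by unfold Spec_can_mid; infer_instance

-- ===== CLAIM (what is proved, stated in full; the proofs are below) =====
def Claim_equal_can_mid : Prop := ∀ (midlen : Int) (midstr : String) (midpos : Int), Dom_can_mid midlen midstr midpos → Pre_can_mid midlen midstr midpos → Spec_can_mid midlen midstr midpos (can_mid midlen midstr midpos)

-- ===== LEMMAS AND PROOFS =====

-- The even loop, when every in-window index is in range, decides pairwise equality of the window.
lemma evenLoop_true_iff (midlen : Int) (s : List Char) (ni i : Int)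
    (hi : 0 ≤ i)
    (hsafe : ∀ j : Int, 0 ≤ j → j < midlen - ni → j < ni → j + ni < (s.length : Int)) :
    canMidEvenLoop midlen s ni i = true ↔
      ∀ j : Int, i ≤ j → j < midlen - ni → j < ni →
        s.getD (j + ni).toNat 'a' = s.getD (ni - j - 1).toNat 'a' := by
  revert hi
  induction i using canMidEvenLoop.induct midlen s ni with
  | case1 i h a b hb ha hne =>
    intro hi
    rw [canMidEvenLoop, dif_pos h, ha, hb]
    change (if a ≠ b then false else canMidEvenLoop midlen s ni (i + 1)) = true ↔ _
    rw [if_pos hne]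
    simp only [Bool.false_eq_true, false_iff]
    intro hall
    have h2 : i + ni < (s.length : Int) := hsafe i hi h.1 h.2
    rw [PySem.List.pyGet?_eq_some_getElem s (by omega) h2] at ha
    rw [PySem.List.pyGet?_eq_some_getElem s (by omega) (by omega : ni - i - 1 < (s.length:Int))] at hb
    have := hall i le_rfl h.1 h.2
    rw [List.getD_eq_getElem _ _ (by omega : (i+ni).toNat < s.length),
        List.getD_eq_getElem _ _ (by omega : (ni-i-1).toNat < s.length)] at this
    exact hne (by rw [← Option.some.inj ha, ← Option.some.inj hb]; exact this)
  | case2 i h a b hb ha hne ih =>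
    intro hi
    rw [canMidEvenLoop, dif_pos h, ha, hb]
    change (if a ≠ b then false else canMidEvenLoop midlen s ni (i + 1)) = true ↔ _
    rw [if_neg hne]
    rw [ih (by omega)]
    constructor
    · intro hall j hj h1 h2
      rcases eq_or_lt_of_le hj with heq | hj'
      · subst heq
        have h2' : i + ni < (s.length : Int) := hsafe i hi h.1 h.2
        rw [PySem.List.pyGet?_eq_some_getElem s (by omega) h2'] at ha
        rw [PySem.List.pyGet?_eq_some_getElem s (by omega) (by omega : ni - i - 1 < (s.length:Int))] at hb
        rw [List.getD_eq_getElem _ _ (by omega : (i+ni).toNat < s.length),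
            List.getD_eq_getElem _ _ (by omega : (ni-i-1).toNat < s.length)]
        rw [Option.some.inj ha, Option.some.inj hb]
        exact not_ne_iff.mp hne
      · exact hall j (by omega) h1 h2
    · intro hall j hj h1 h2
      exact hall j (by omega) h1 h2
  | case3 i h hfalse =>
    intro hi
    exfalso
    have h2 : i + ni < (s.length : Int) := hsafe i hi h.1 h.2
    exact hfalse _ _ (PySem.List.pyGet?_eq_some_getElem s (by omega) h2)
      (PySem.List.pyGet?_eq_some_getElem s (by omega) (by omega : ni - i - 1 < (s.length:Int)))
  | case4 i h =>
    intro hi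
    rw [canMidEvenLoop, dif_neg h]
    simp only [true_iff]
    intro j hj h1 h2
    exact absurd ⟨by omega, by omega⟩ h

lemma oddLoop_true_iff (midlen : Int) (s : List Char) (ni i : Int)
    (hi : 0 ≤ i)
    (hsafe : ∀ j : Int, 0 ≤ j → j < midlen - ni - 1 → j < ni → j + ni + 1 < (s.length : Int)) :
    canMidOddLoop midlen s ni i = true ↔
      ∀ j : Int, i ≤ j → j < midlen - ni - 1 → j < ni →
        s.getD (j + ni + 1).toNat 'a' = s.getD (ni - j - 1).toNat 'a' := by
  revert hi
  induction i using canMidOddLoop.induct midlen s ni with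
  | case1 i h a b hb ha hne =>
    intro hi
    rw [canMidOddLoop, dif_pos h, ha, hb]
    change (if a ≠ b then false else canMidOddLoop midlen s ni (i + 1)) = true ↔ _
    rw [if_pos hne]
    simp only [Bool.false_eq_true, false_iff]
    intro hall
    have h2 : i + ni + 1 < (s.length : Int) := hsafe i hi h.1 h.2
    rw [PySem.List.pyGet?_eq_some_getElem s (by omega) h2] at ha
    rw [PySem.List.pyGet?_eq_some_getElem s (by omega) (by omega : ni - i - 1 < (s.length:Int))] at hb
    have := hall i le_rfl h.1 h.2
    rw [List.getD_eq_getElem _ _ (by omega : (i+ni+1).toNat < s.length),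
        List.getD_eq_getElem _ _ (by omega : (ni-i-1).toNat < s.length)] at this
    exact hne (by rw [← Option.some.inj ha, ← Option.some.inj hb]; exact this)
  | case2 i h a b hb ha hne ih =>
    intro hi
    rw [canMidOddLoop, dif_pos h, ha, hb]
    change (if a ≠ b then false else canMidOddLoop midlen s ni (i + 1)) = true ↔ _
    rw [if_neg hne]
    rw [ih (by omega)]
    constructor
    · intro hall j hj h1 h2
      rcases eq_or_lt_of_le hj with heq | hj'
      · subst heq
        have h2' : i + ni + 1 < (s.length : Int) := hsafe i hi h.1 h.2
        rw [PySem.List.pyGet?_eq_some_getElem s (by omega) h2'] at ha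
        rw [PySem.List.pyGet?_eq_some_getElem s (by omega) (by omega : ni - i - 1 < (s.length:Int))] at hb
        rw [List.getD_eq_getElem _ _ (by omega : (i+ni+1).toNat < s.length),
            List.getD_eq_getElem _ _ (by omega : (ni-i-1).toNat < s.length)]
        rw [Option.some.inj ha, Option.some.inj hb]
        exact not_ne_iff.mp hne
      · exact hall j (by omega) h1 h2
    · intro hall j hj h1 h2
      exact hall j (by omega) h1 h2
  | case3 i h hfalse =>
    intro hi
    exfalso
    have h2 : i + ni + 1 < (s.length : Int) := hsafe i hi h.1 h.2
    exact hfalse _ _ (PySem.List.pyGet?_eq_some_getElem s (by omega) h2)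
      (PySem.List.pyGet?_eq_some_getElem s (by omega) (by omega : ni - i - 1 < (s.length:Int)))
  | case4 i h =>
    intro hi
    rw [canMidOddLoop, dif_neg h]
    simp only [true_iff]
    intro j hj h1 h2
    exact absurd ⟨by omega, by omega⟩ h

-- B's reversed-slice comparison decides the same pairwise equality (off = ni for even, ni+1 for odd).
lemma reverse_slice_eq_iff (s : List Char) (ni off c : Int)
    (hc : 0 < c) (h0 : 0 ≤ ni - c) (hni : ni ≤ off)
    (hoff : off + c ≤ (s.length : Int)) :
    ((PySem.List.slice s (some (ni - c)) (some ni)).reverse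
        == PySem.List.slice s (some off) (some (off + c))) = true ↔
      ∀ j : Int, 0 ≤ j → j < c →
        s.getD (j + off).toNat 'a' = s.getD (ni - j - 1).toNat 'a' := by
  rw [beq_iff_eq]
  rw [PySem.List.slice_toNat s (a := ni - c) (b := ni) (by omega) (by omega),
      PySem.List.slice_toNat s (a := off) (b := off + c) (by omega) (by omega)]
  have hlen1 : ((s.drop (ni - c).toNat).take (ni.toNat - (ni - c).toNat)).length = c.toNat := by
    simp [List.length_take, List.length_drop]; omega
  have hlen2 : ((s.drop off.toNat).take ((off + c).toNat - off.toNat)).length = c.toNat := by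
    simp [List.length_take, List.length_drop]; omega
  constructor
  · intro heq j hj0 hjc
    have hk : j.toNat < c.toNat := by omega
    have := congrArg (fun l => l.getD j.toNat 'a') heq
    simp only [List.getD_eq_getElem?_getD] at this
    rw [List.getElem?_reverse (by rw [hlen1]; omega)] at this
    rw [hlen1] at this
    rw [List.getElem?_take_of_lt (by omega), List.getElem?_take_of_lt (by omega),
        List.getElem?_drop, List.getElem?_drop] at this
    rw [List.getD_eq_getElem _ _ (by omega : (j + off).toNat < s.length),
        List.getD_eq_getElem _ _ (by omega : (ni - j - 1).toNat < s.length)]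
    rw [List.getElem?_eq_getElem (by omega), List.getElem?_eq_getElem (by omega)] at this
    simp only [Option.getD_some] at this
    have e1 : (ni - c).toNat + (c.toNat - 1 - j.toNat) = (ni - j - 1).toNat := by omega
    have e2 : off.toNat + j.toNat = (j + off).toNat := by omega
    simp only [e1, e2] at this
    exact this.symm
  · intro hall
    apply List.ext_getElem
    · rw [List.length_reverse, hlen1, hlen2]
    · intro k hk1 hk2
      rw [List.length_reverse, hlen1] at hk1
      rw [List.getElem_reverse]
      rw [List.getElem_take, List.getElem_drop, List.getElem_take, List.getElem_drop]
      have := hall (k : Int) (by omega) (by omega)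
      rw [List.getD_eq_getElem _ _ (by omega : ((k:Int) + off).toNat < s.length),
          List.getD_eq_getElem _ _ (by omega : (ni - (k:Int) - 1).toNat < s.length)] at this
      have e1 : (ni - c).toNat + (((s.drop (ni - c).toNat).take (ni.toNat - (ni - c).toNat)).length - 1 - k) = (ni - (k:Int) - 1).toNat := by
        rw [hlen1]; omega
      have e2 : off.toNat + k = ((k:Int) + off).toNat := by omega
      simp only [e1, e2]
      exact this.symm

-- Even branch: A's loop equals B's count/slice expression, given the even Pre_ disjunction.
lemma even_branch (midlen : Int) (s : List Char) (ni : Int)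
    (hpre : midlen ≤ (s.length:Int) ∨ ni ≤ 0 ∨ midlen ≤ ni ∨ 2*ni ≤ (s.length:Int)) :
    canMidEvenLoop midlen s ni 0 =
      (if min ni (midlen - ni) ≤ 0 then true
       else ((PySem.List.slice s (some (ni - min ni (midlen - ni))) (some ni)).reverse
          == PySem.List.slice s (some ni) (some (ni + min ni (midlen - ni))))) := by
  set c := min ni (midlen - ni) with hc
  by_cases h0 : c ≤ 0
  · rw [if_pos h0]
    exact (evenLoop_true_iff midlen s ni 0 le_rfl
      (fun j hj h1 h2 => (by omega : False).elim)).mpr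
      (fun j hj h1 h2 => (by omega : False).elim)
  · rw [if_neg h0]
    have h0' : 0 < c := by omega
    have hsafe : ∀ j : Int, 0 ≤ j → j < midlen - ni → j < ni → j + ni < (s.length:Int) := by
      intro j hj h1 h2; omega
    rw [Bool.eq_iff_iff]
    rw [evenLoop_true_iff midlen s ni 0 le_rfl hsafe,
        reverse_slice_eq_iff s ni ni c h0' (by omega) le_rfl (by omega)]
    constructor
    · intro hall j hj hjc
      exact hall j hj (by omega) (by omega)
    · intro hall j hj h1 h2
      exact hall j hj (by omega)

-- Odd branch: as even_branch, with the comparison window shifted one to the right.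
lemma odd_branch (midlen : Int) (s : List Char) (ni : Int)
    (hpre : midlen ≤ (s.length:Int) ∨ ni ≤ 0 ∨ midlen ≤ ni + 1 ∨ 2*ni < (s.length:Int)) :
    canMidOddLoop midlen s ni 0 =
      (if min ni (midlen - ni - 1) ≤ 0 then true
       else ((PySem.List.slice s (some (ni - min ni (midlen - ni - 1))) (some ni)).reverse
          == PySem.List.slice s (some (ni + 1)) (some (ni + 1 + min ni (midlen - ni - 1))))) := by
  set c := min ni (midlen - ni - 1) with hc
  by_cases h0 : c ≤ 0
  · rw [if_pos h0]
    exact (oddLoop_true_iff midlen s ni 0 le_rfl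
      (fun j hj h1 h2 => (by omega : False).elim)).mpr
      (fun j hj h1 h2 => (by omega : False).elim)
  · rw [if_neg h0]
    have h0' : 0 < c := by omega
    have hsafe : ∀ j : Int, 0 ≤ j → j < midlen - ni - 1 → j < ni → j + ni + 1 < (s.length:Int) := by
      intro j hj h1 h2; omega
    rw [Bool.eq_iff_iff]
    rw [oddLoop_true_iff midlen s ni 0 le_rfl hsafe,
        reverse_slice_eq_iff s ni (ni + 1) c h0' (by omega) (by omega) (by omega)]
    constructor
    · intro hall j hj hjc
      have h := hall j hj (by omega) (by omega)
      rw [show j + (ni + 1) = j + ni + 1 by ring]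
      exact h
    · intro hall j hj h1 h2
      have h := hall j hj (by omega)
      rw [show j + (ni + 1) = j + ni + 1 by ring] at h
      exact h

theorem can_mid_spec : Claim_equal_can_mid := by
  intro midlen midstr midpos _ hpre
  unfold Spec_can_mid can_mid can_mid_alt
  have hmod : PySem.Int.mod midpos 2 = midpos % 2 := PySem.Int.mod_eq_emod_of_pos (by norm_num)
  unfold Pre_can_mid at hpre
  by_cases hp : midpos % 2 = 0
  · rw [if_pos hp] at hpre
    rw [hmod, if_pos (by simp [hp]), if_pos (by simp [hp])]
    exact even_branch midlen midstr.toList (PySem.Int.floordiv midpos 2) hpre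
  · rw [if_neg hp] at hpre
    rw [hmod, if_neg (by simp [hp]), if_neg (by simp [hp])]
    exact odd_branch midlen midstr.toList (PySem.Int.floordiv (midpos - 1) 2) hpre
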